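-- pv_equiv track=rewrite | github.com/Subhamsidhanta/Shiritori-Method-Game | app.py | validate_real_word_fallback
-- ===== SOURCE A (Python) =====
-- def validate_real_word_fallback(word: str) -> bool:
--     """Fallback validation to check if a word is likely a real English word"""
--     word = word.lower().strip()
--
--     # Very basic validation - reject obviously fake words
--     # Accept most words but reject some obvious patterns
--
--     # Reject if too many repeated characters
--     if len(set(word)) < len(word) / 3:  # Too many repeated characters
--         return False
--
--     # Reject if too many consonants in a row
--     vowels = set('aeiou')
--     consonant_count = 0
--     for char in word:
--         if char in vowels:
--             consonant_count = 0
--         else: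
--             consonant_count += 1
--             if consonant_count > 4:  # Too many consonants in a row
--                 return False
--
--     # Check against some common English words and patterns
--     common_words = {
--         # Common short words
--         'a', 'an', 'and', 'are', 'as', 'at', 'be', 'by', 'for', 'from',
--         'has', 'he', 'in', 'is', 'it', 'its', 'of', 'on', 'that', 'the',
--         'to', 'was', 'were', 'will', 'with', 'the', 'this', 'but', 'his',
--         'have', 'had', 'what', 'said', 'each', 'which', 'she', 'do', 'how',
--         'their', 'if', 'up', 'out', 'many', 'then', 'them', 'can', 'would',
--         'like', 'into', 'him', 'time', 'two', 'more', 'go', 'no', 'way',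
--         'could', 'my', 'than', 'first', 'been', 'call', 'who', 'oil', 'sit',
--         'now', 'find', 'long', 'down', 'day', 'did', 'get', 'come', 'made',
--         'may', 'part', 'over', 'new', 'sound', 'take', 'only', 'little',
--         'work', 'know', 'place', 'year', 'live', 'me', 'back', 'give',
--         'most', 'very', 'after', 'thing', 'our', 'just', 'name', 'good',
--         'sentence', 'man', 'think', 'say', 'great', 'where', 'help',
--         'through', 'much', 'before', 'line', 'right', 'too', 'mean', 'old',
--         'any', 'same', 'tell', 'boy', 'follow', 'came', 'want', 'show',
--         'also', 'around', 'form', 'three', 'small', 'set', 'put', 'end',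
--         'why', 'again', 'turn', 'here', 'off', 'went', 'old', 'number',
--         'great', 'tell', 'men', 'say', 'small', 'every', 'found', 'still',
--         'between', 'mane', 'should', 'home', 'big', 'give', 'air', 'line',
--         'set', 'own', 'under', 'read', 'last', 'never', 'us', 'left',
--         'end', 'along', 'while', 'might', 'next', 'sound', 'below', 'saw',
--         'something', 'thought', 'both', 'few', 'those', 'always', 'looked',
--         'show', 'large', 'often', 'together', 'asked', 'house', 'don',
--         'world', 'going', 'want', 'school', 'important', 'until', 'form',
--         'food', 'keep', 'children', 'feet', 'land', 'side', 'without',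
--         'boy', 'once', 'animal', 'life', 'enough', 'took', 'four', 'head',
--         'above', 'kind', 'began', 'almost', 'live', 'page', 'got', 'earth',
--         'need', 'far', 'hand', 'high', 'year', 'mother', 'light', 'country',
--         'father', 'let', 'night', 'picture', 'being', 'study', 'second',
--         'soon', 'story', 'since', 'white', 'ever', 'paper', 'hard', 'near',
--         'sentence', 'better', 'best', 'across', 'during', 'today', 'however',
--         'sure', 'knew', 'it', 'try', 'told', 'young', 'sun', 'thing',
--         'whole', 'hear', 'example', 'heard', 'several', 'change', 'answer',
--         'room', 'sea', 'against', 'top', 'turned', 'learn', 'point',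
--         'city', 'play', 'toward', 'five', 'himself', 'usually', 'money',
--         'seen', 'didn', 'car', 'morning', 'I', 'words', 'family', 'running',
--         'red', 'blue', 'green', 'yellow', 'black', 'white', 'orange', 'purple',
--         'apple', 'banana', 'cat', 'dog', 'house', 'tree', 'water', 'fire',
--         'book', 'chair', 'table', 'computer', 'phone', 'car', 'food', 'love'
--     }
--
--     # Accept if it's a common word
--     if word in common_words:
--         return True
--
--     # Accept words with common English patterns
--     # Most English words are acceptable unless they're obviously nonsense
--     return True
-- ===== SOURCE B (Python) =====
-- import re
--
-- _RUN5 = re.compile(r'[^aeiou]{5}')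
--
-- def validate_real_word_fallback(word: str) -> bool:
--     """Fallback validation to check if a word is likely a real English word."""
--     word = word.lower().strip()
--     # Too many repeated characters
--     if len(set(word)) < len(word) / 3:
--         return False
--     # Five (or more) consecutive non-vowel characters
--     if _RUN5.search(word):
--         return False
--     return True
-- ===== Notes on version B (the rewrite author's own statement) =====
-- stated objective: idiomatic
-- what changed: The stateful consonant-counter loop with early exit is replaced by a single regex search for five consecutive non-vowel characters, and the dead common_words table (both of whose branches returned True) is dropped.
import Mathlib
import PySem

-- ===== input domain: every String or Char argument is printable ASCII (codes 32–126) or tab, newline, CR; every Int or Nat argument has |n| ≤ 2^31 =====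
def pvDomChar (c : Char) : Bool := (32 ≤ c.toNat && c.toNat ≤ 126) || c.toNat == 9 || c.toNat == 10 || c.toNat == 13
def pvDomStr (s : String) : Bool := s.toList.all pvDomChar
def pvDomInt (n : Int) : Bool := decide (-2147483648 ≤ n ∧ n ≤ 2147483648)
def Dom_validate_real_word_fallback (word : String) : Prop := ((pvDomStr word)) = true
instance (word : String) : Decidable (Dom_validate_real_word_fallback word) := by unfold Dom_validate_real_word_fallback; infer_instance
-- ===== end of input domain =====

-- B replaces A's stateful consonant-counter loop with a declarative search for five
-- consecutive non-vowels (the regex [^aeiou]{5}) and drops the dead common_words table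
-- (both of its branches returned True); objective: idiomatic, same O(n) cost.

-- ===== PORT A =====
-- vowels = set('aeiou')
def pvVowelsA : PySem.Set Char := PySem.Set.ofList "aeiou".toList

-- the consonant-counting for-loop with its early 'return False' (counter is always ≥ 0,
-- so Nat is exact here)
def pvLoopA : List Char → Nat → Bool
  | [], _ => true
  | c :: rest, cnt =>
    if PySem.Set.contains pvVowelsA c then pvLoopA rest 0
    else if cnt + 1 > 4 then false else pvLoopA rest (cnt + 1)

-- the common_words set literal of A (dead code: both branches after it return True)
def pvCommonWordsA : PySem.Set String := PySem.Set.ofList ["a", "an", "and", "are", "as", "at", "be", "by", "for", "from", "has", "he", "in", "is", "it", "its", "of", "on", "that", "the", "to", "was", "were", "will", "with", "the", "this", "but", "his", "have", "had", "what", "said", "each", "which", "she", "do", "how", "their", "if", "up", "out", "many", "then", "them", "can", "would", "like", "into", "him", "time", "two", "more", "go", "no", "way", "could", "my", "than", "first", "been", "call", "who", "oil", "sit", "now", "find", "long", "down", "day", "did", "get", "come", "made", "may", "part", "over", "new", "sound", "take", "only", "little", "work", "know", "place", "year", "live", "me", "back", "give", "most", "very", "after", "thing", "our", "just", "name", "good",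 "sentence", "man", "think", "say", "great", "where", "help", "through", "much", "before", "line", "right", "too", "mean", "old", "any", "same", "tell", "boy", "follow", "came", "want", "show", "also", "around", "form", "three", "small", "set", "put", "end", "why", "again", "turn", "here", "off", "went", "old", "number", "great", "tell", "men", "say", "small", "every", "found", "still", "between", "mane", "should", "home", "big", "give", "air", "line", "set", "own", "under", "read", "last", "never", "us", "left", "end", "along", "while", "might", "next", "sound", "below", "saw", "something", "thought", "both", "few", "those", "always", "looked", "show", "large", "often", "together", "asked", "house", "don", "world", "going", "want", "school", "important", "until", "form", "food", "keep", "children", "feet", "land", "side", "without", "boy", "once", "animal", "life", "enough", "took", "four", "head", "above", "kind", "began", "almost", "live", "page", "got", "earth", "need", "far", "hand", "high", "year", "mother", "light", "country", "father", "let", "night", "picture", "being", "study", "second", "soon", "story", "since", "white", "ever", "paper", "hard", "near", "sentence", "better", "best", "across", "during", "today", "however", "sure", "knew", "it", "try", "told", "young", "sun", "thing", "whole", "hear", "example", "heard", "several", "change", "answer", "room", "sea", "against", "top", "turned", "learn", "point", "city", "play", "toward", "five", "himself", "usually", "money", "seen", "didn", "car", "morning", "I", "words", "family", "running", "red", "blue",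 "green", "yellow", "black", "white", "orange", "purple", "apple", "banana", "cat", "dog", "house", "tree", "water", "fire", "book", "chair", "table", "computer", "phone", "car", "food", "love"]

def validate_real_word_fallback (word : String) : Bool :=
  let w := PySem.Str.strip (PySem.Str.lower word)
  -- len(set(word)) < len(word) / 3 : Python true division; for the integers involved
  -- this float comparison is exactly 3 * len(set(word)) < len(word)
  if 3 * PySem.Set.len (PySem.Set.ofList w.toList) < PySem.Str.len w then false
  else if pvLoopA w.toList 0 then
    if PySem.Set.contains pvCommonWordsA w then true else true
  else false

-- ===== PORT B =====
-- re.search(r'[^aeiou]{5}', w): some position in w starts ≥ 5 consecutive non-vowels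
def pvWin5 (t : List Char) : Bool :=
  ((t.take 5).length == 5) && (t.take 5).all (fun c => !(c ∈ "aeiou".toList))

def pvSearchRun5 (cs : List Char) : Bool := cs.tails.any pvWin5

def validate_real_word_fallback_alt (word : String) : Bool :=
  let w := PySem.Str.strip (PySem.Str.lower word)
  if 3 * PySem.Set.len (PySem.Set.ofList w.toList) < PySem.Str.len w then false
  else if pvSearchRun5 w.toList then false
  else true

-- ===== PRECONDITION & SPEC =====
def Spec_validate_real_word_fallback (word : String) (out : Bool) : Prop := out = validate_real_word_fallback_alt word
instance (word : String) (out : Bool) : Decidable (Spec_validate_real_word_fallback word out) := by unfold Spec_validate_real_word_fallback; infer_instance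

-- ===== CLAIM (what is proved, stated in full; the proofs are below) =====
def Claim_equal_validate_real_word_fallback : Prop := ∀ (word : String), Dom_validate_real_word_fallback word → Spec_validate_real_word_fallback word (validate_real_word_fallback word)

-- ===== LEMMAS AND PROOFS =====

-- abstraction of both scans to the boolean "non-vowel" mask
def pvNV (c : Char) : Bool := !(c ∈ "aeiou".toList)

def pvLoopM : List Bool → Nat → Bool
  | [], _ => true
  | b :: rest, cnt =>
    if !b then pvLoopM rest 0
    else if cnt + 1 > 4 then false else pvLoopM rest (cnt + 1)

def pvWinM (t : List Bool) : Bool := ((t.take 5).length == 5) && (t.take 5).all id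

def pvSearchM (bs : List Bool) : Bool := bs.tails.any pvWinM

theorem pvSearchM_cons (x : Bool) (l : List Bool) :
    pvSearchM (x :: l) = (pvWinM (x :: l) || pvSearchM l) := by
  unfold pvSearchM
  rw [List.tails_cons, List.any_cons]

theorem pvVowelsA_contains (c : Char) :
    PySem.Set.contains pvVowelsA c = decide (c ∈ "aeiou".toList) := by
  simp [pvVowelsA, PySem.Set.contains]

theorem pvLoopA_eq_mask (cs : List Char) (cnt : Nat) :
    pvLoopA cs cnt = pvLoopM (cs.map pvNV) cnt := by
  induction cs generalizing cnt with
  | nil => rfl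
  | cons c rest ih =>
    simp only [pvLoopA, pvLoopM, List.map_cons, pvNV, Bool.not_not, pvVowelsA_contains]
    by_cases h : c ∈ "aeiou".toList <;> simp [ih]

theorem pvWin5_eq_mask (t : List Char) : pvWin5 t = pvWinM (t.map pvNV) := by
  simp only [pvWin5, pvWinM, ← List.map_take, List.length_map, List.all_map]
  rfl

theorem pvSearch_eq_mask (cs : List Char) :
    pvSearchRun5 cs = pvSearchM (cs.map pvNV) := by
  unfold pvSearchRun5 pvSearchM
  rw [List.map_tails, List.any_map]
  refine congrArg (List.any (List.tails cs)) (funext fun t => ?_)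
  simpa using pvWin5_eq_mask t

theorem pvWinM_false_of_mid_false (c : Nat) (hc : c ≤ 4) (bs : List Bool) :
    pvWinM (List.replicate c true ++ false :: bs) = false := by
  interval_cases c <;> simp [pvWinM, List.replicate]

theorem pvSearchM_vowel (c : Nat) (hc : c ≤ 4) (bs : List Bool) :
    pvSearchM (List.replicate c true ++ false :: bs) = pvSearchM bs := by
  induction c with
  | zero =>
    have h0 := pvWinM_false_of_mid_false 0 (by omega) bs
    simp only [List.replicate, List.nil_append] at h0 ⊢
    rw [pvSearchM_cons, h0, Bool.false_or]
  | succ k ih =>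
    have hk : k ≤ 4 := by omega
    rw [List.replicate_succ, List.cons_append, pvSearchM_cons,
      show true :: (List.replicate k true ++ false :: bs) =
        List.replicate (k + 1) true ++ false :: bs by
          rw [List.replicate_succ, List.cons_append],
      pvWinM_false_of_mid_false (k + 1) hc bs, ih hk, Bool.false_or]

theorem pvSearchM_replicate (c : Nat) (hc : c ≤ 4) :
    pvSearchM (List.replicate c true) = false := by
  interval_cases c <;> decide

theorem pvLoopM_char (bs : List Bool) (c : Nat) (hc : c ≤ 4) :
    pvLoopM bs c = !pvSearchM (List.replicate c true ++ bs) := by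
  induction bs generalizing c with
  | nil => simp [pvLoopM, pvSearchM_replicate c hc]
  | cons b rest ih =>
    cases b with
    | false =>
      simp only [pvLoopM, Bool.not_false, if_true]
      rw [pvSearchM_vowel c hc rest, ih 0 (by omega)]
      simp
    | true =>
      rw [show List.replicate c true ++ true :: rest =
          List.replicate (c + 1) true ++ rest by
        rw [List.replicate_succ', List.append_assoc]; rfl]
      simp only [pvLoopM, Bool.not_true]
      rw [if_neg (by simp)]
      by_cases h5 : c + 1 > 4
      · have hc5 : c + 1 = 5 := by omega
        rw [if_pos h5, hc5]
        rw [show List.replicate 5 true ++ rest =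
            true :: true :: true :: true :: true :: rest from rfl,
          pvSearchM_cons]
        have hwin : pvWinM (true :: true :: true :: true :: true :: rest) = true := by
          simp [pvWinM]
        rw [hwin, Bool.true_or, Bool.not_true]
      · rw [if_neg h5, ih (c + 1) (by omega)]

-- ===== VERDICT (by name: the statement is the Claim_ definition above) =====
theorem validate_real_word_fallback_spec : Claim_equal_validate_real_word_fallback := by
  intro word _
  unfold Spec_validate_real_word_fallback validate_real_word_fallback validate_real_word_fallback_alt
  set w := PySem.Str.strip (PySem.Str.lower word) with hw
  by_cases hdup : 3 * PySem.Set.len (PySem.Set.ofList w.toList) < PySem.Str.len w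
  · rw [if_pos hdup, if_pos hdup]
  · rw [if_neg hdup, if_neg hdup, ite_self]
    rw [pvLoopA_eq_mask, pvSearch_eq_mask,
      pvLoopM_char (w.toList.map pvNV) 0 (by omega)]
    rw [List.replicate_zero, List.nil_append]
    cases pvSearchM (w.toList.map pvNV) <;> rfl
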